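-- pv_equiv track=rewrite | github.com/zjl233/pyLeetCode | week15/cd19.py | deck_game_dp
-- ===== SOURCE A (Python) =====
-- from typing import List
--
-- def deck_game_dp(nums: List[int]) -> int:
--     n = len(nums)
--     fdp = [[0] * n for _ in range(n)]
--     sdp = [[0] * n for _ in range(n)]
--
--     for i in range(n):
--         fdp[i][i] = nums[i]
--         sdp[i][i] = 0
--
--     for i in range(1, n):
--         r, c = 0, i
--         while c < n:
--             fdp[r][c] = max(nums[r] + sdp[r + 1][c], nums[c] + sdp[r][c - 1])
--             sdp[r][c] = min(fdp[r + 1][c], fdp[r][c - 1])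
--
--             r += 1
--             c += 1
--
--     return max(fdp[0][n - 1], sdp[0][n - 1])
-- ===== SOURCE B (Python) =====
-- from typing import List
--
-- def deck_game_dp(nums: List[int]) -> int:
--     # Single 1-D interval DP on the score DIFFERENCE (mover minus opponent);
--     # max(P1, P2) = (total + |difference|) // 2.
--     n = len(nums)
--     dp = nums[:]  # dp[j] holds the optimal difference on nums[i..j] for the current i
--     for i in range(n - 2, -1, -1):
--         for j in range(i + 1, n):
--             dp[j] = max(nums[i] - dp[j], nums[j] - dp[j - 1])
--     return (sum(nums) + abs(dp[n - 1])) // 2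
-- ===== Notes on version B (the rewrite author's own statement) =====
-- stated objective: faster
-- what changed: Replaces the two n-by-n score tables (first/second-player values filled along diagonals with an inner while cursor) by a single in-place 1-D difference DP dp[j] = optimal (mover - opponent) score over nums[i..j], recovering the answer as (sum(nums) + abs(dp[n-1])) // 2.
import Mathlib
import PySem

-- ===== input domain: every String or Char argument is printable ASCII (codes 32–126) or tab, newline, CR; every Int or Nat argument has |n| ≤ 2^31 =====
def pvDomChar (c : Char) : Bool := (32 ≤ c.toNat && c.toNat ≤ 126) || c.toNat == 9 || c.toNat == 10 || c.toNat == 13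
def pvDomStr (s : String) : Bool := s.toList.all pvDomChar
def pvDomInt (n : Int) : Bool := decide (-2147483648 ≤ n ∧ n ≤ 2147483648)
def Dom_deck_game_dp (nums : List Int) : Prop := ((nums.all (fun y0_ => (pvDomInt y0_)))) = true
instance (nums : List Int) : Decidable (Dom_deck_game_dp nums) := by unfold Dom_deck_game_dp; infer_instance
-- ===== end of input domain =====

-- B replaces A's two n×n score tables by one 1-D difference DP (same O(n^2) time, O(n) space);
-- equivalence is proved for nonempty input (A raises IndexError on []).

-- ===== PORT A =====
-- read / write of a cell of a list-of-lists table (Python in-range t[r][c] and t[r][c] = v)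
def pvGet2 (t : List (List Int)) (r c : Nat) : Int := (t.getD r []).getD c 0
def pvSet2 (t : List (List Int)) (r c : Nat) (v : Int) : List (List Int) :=
  t.set r ((t.getD r []).set c v)

-- the inner `while c < n` loop of A; fuel ≥ n - c suffices
def deckAWhile (nums : List Int) (n : Nat) :
    Nat → Nat → Nat → List (List Int) × List (List Int) → List (List Int) × List (List Int)
  | 0, _, _, st => st
  | fuel + 1, r, c, (f, s) =>
    if c < n then
      let f' := pvSet2 f r c (max (nums.getD r 0 + pvGet2 s (r + 1) c)
                                  (nums.getD c 0 + pvGet2 s r (c - 1)))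
      let s' := pvSet2 s r c (min (pvGet2 f' (r + 1) c) (pvGet2 f' r (c - 1)))
      deckAWhile nums n fuel (r + 1) (c + 1) (f', s')
    else (f, s)

def deck_game_dp (nums : List Int) : Int :=
  let n := nums.length
  let fdp0 := List.replicate n (List.replicate n (0 : Int))
  let sdp0 := List.replicate n (List.replicate n (0 : Int))
  let st1 := (List.range n).foldl
      (fun st i => (pvSet2 st.1 i i (nums.getD i 0), pvSet2 st.2 i i 0)) (fdp0, sdp0)
  let st2 := (List.range' 1 (n - 1)).foldl (fun st i => deckAWhile nums n n 0 i st) st1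
  max (pvGet2 st2.1 0 (n - 1)) (pvGet2 st2.2 0 (n - 1))

-- ===== PORT B =====
def deck_game_dp_alt (nums : List Int) : Int :=
  let n := nums.length
  let dp := ((List.range (n - 1)).reverse).foldl
      (fun dp i =>
        (List.range' (i + 1) (n - 1 - i)).foldl
          (fun dp j =>
            dp.set j (max (nums.getD i 0 - dp.getD j 0) (nums.getD j 0 - dp.getD (j - 1) 0)))
          dp)
      nums
  PySem.Int.floordiv (nums.sum + |dp.getD (n - 1) 0|) 2

-- ===== PRECONDITION & SPEC =====
-- Pre_ excludes only the empty list, on which A raises IndexError (fdp[0] on an empty table).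
def Pre_deck_game_dp (nums : List Int) : Prop := nums ≠ []
instance (nums : List Int) : Decidable (Pre_deck_game_dp nums) := by
  unfold Pre_deck_game_dp; infer_instance
def pvWitness_deck_game_dp : List Int := [5, -2, 7]

def Spec_deck_game_dp (nums : List Int) (out : Int) : Prop := out = deck_game_dp_alt nums
instance (nums : List Int) (out : Int) : Decidable (Spec_deck_game_dp nums out) := by
  unfold Spec_deck_game_dp; infer_instance

-- ===== CLAIM (what is proved, stated in full; the proofs are below) =====
def Claim_equal_deck_game_dp : Prop :=
  ∀ (nums : List Int), Dom_deck_game_dp nums → Pre_deck_game_dp nums →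
    Spec_deck_game_dp nums (deck_game_dp nums)

-- ===== LEMMAS AND PROOFS =====

-- optimal first-player score / second-player score / score difference / segment sum on nums[r..c]
mutual
def pvF (nums : List Int) (r c : Nat) : Int :=
  if c ≤ r then nums.getD r 0
  else max (nums.getD r 0 + pvS nums (r + 1) c) (nums.getD c 0 + pvS nums r (c - 1))
termination_by c - r
decreasing_by all_goals omega
def pvS (nums : List Int) (r c : Nat) : Int :=
  if c ≤ r then 0
  else min (pvF nums (r + 1) c) (pvF nums r (c - 1))
termination_by c - r
decreasing_by all_goals omega
end

def pvD (nums : List Int) (r c : Nat) : Int :=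
  if c ≤ r then nums.getD r 0
  else max (nums.getD r 0 - pvD nums (r + 1) c) (nums.getD c 0 - pvD nums r (c - 1))
termination_by c - r
decreasing_by all_goals omega

def pvSum (nums : List Int) (r c : Nat) : Int :=
  if c ≤ r then nums.getD r 0 else nums.getD r 0 + pvSum nums (r + 1) c
termination_by c - r
decreasing_by all_goals omega


lemma pvF_le (nums : List Int) {r c : Nat} (h : c ≤ r) : pvF nums r c = nums.getD r 0 := by
  rw [pvF]; rw [if_pos h]
lemma pvF_gt (nums : List Int) {r c : Nat} (h : r < c) : pvF nums r c =
    max (nums.getD r 0 + pvS nums (r + 1) c) (nums.getD c 0 + pvS nums r (c - 1)) := by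
  rw [pvF]; rw [if_neg (by omega)]
lemma pvS_le (nums : List Int) {r c : Nat} (h : c ≤ r) : pvS nums r c = 0 := by
  rw [pvS]; rw [if_pos h]
lemma pvS_gt (nums : List Int) {r c : Nat} (h : r < c) : pvS nums r c =
    min (pvF nums (r + 1) c) (pvF nums r (c - 1)) := by
  rw [pvS]; rw [if_neg (by omega)]
lemma pvD_le (nums : List Int) {r c : Nat} (h : c ≤ r) : pvD nums r c = nums.getD r 0 := by
  rw [pvD]; rw [if_pos h]
lemma pvD_gt (nums : List Int) {r c : Nat} (h : r < c) : pvD nums r c =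
    max (nums.getD r 0 - pvD nums (r + 1) c) (nums.getD c 0 - pvD nums r (c - 1)) := by
  rw [pvD]; rw [if_neg (by omega)]
lemma pvSum_le (nums : List Int) {r c : Nat} (h : c ≤ r) : pvSum nums r c = nums.getD r 0 := by
  rw [pvSum]; rw [if_pos h]
lemma pvSum_gt (nums : List Int) {r c : Nat} (h : r < c) : pvSum nums r c =
    nums.getD r 0 + pvSum nums (r + 1) c := by
  rw [pvSum]; rw [if_neg (by omega)]

lemma pvSum_split_right (nums : List Int) : ∀ (k r c : Nat), c - r ≤ k → r < c →
    pvSum nums r c = pvSum nums r (c - 1) + nums.getD c 0 := by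
  intro k
  induction k with
  | zero => intro r c h1 h2; omega
  | succ k ih =>
    intro r c h1 h2
    rw [pvSum_gt nums h2]
    by_cases hrc : r + 1 = c
    · subst hrc
      rw [pvSum_le nums (by omega)]
      have he : r + 1 - 1 = r := by omega
      rw [he, pvSum_le nums (by omega)]
    · rw [ih (r + 1) c (by omega) (by omega)]
      rw [pvSum_gt nums (by omega : r < c - 1)]
      ring

lemma pvFS_sum_aux (nums : List Int) : ∀ (k r c : Nat), c - r ≤ k →
    pvF nums r c + pvS nums r c = pvSum nums r c := by
  intro k
  induction k with
  | zero =>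
    intro r c h
    rw [pvF_le nums (by omega), pvS_le nums (by omega), pvSum_le nums (by omega)]
    ring
  | succ k ih =>
    intro r c h
    by_cases hrc : c ≤ r
    · rw [pvF_le nums hrc, pvS_le nums hrc, pvSum_le nums hrc]; ring
    · rw [pvF_gt nums (show r < c by omega), pvS_gt nums (show r < c by omega)]
      have h1 := ih (r + 1) c (by omega)
      have h2 := ih r (c - 1) (by omega)
      have h3 : pvSum nums r c = nums.getD r 0 + pvSum nums (r + 1) c :=
        pvSum_gt nums (by omega)
      have h4 : pvSum nums r c = pvSum nums r (c - 1) + nums.getD c 0 :=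
        pvSum_split_right nums (c - r) r c (by omega) (by omega)
      rcases max_cases (nums.getD r 0 + pvS nums (r + 1) c)
          (nums.getD c 0 + pvS nums r (c - 1)) with ⟨hm, _⟩ | ⟨hm, _⟩ <;>
        rcases min_cases (pvF nums (r + 1) c) (pvF nums r (c - 1)) with
          ⟨hm2, hle⟩ | ⟨hm2, hle⟩ <;>
        omega

lemma pvFS_sum (nums : List Int) (r c : Nat) :
    pvF nums r c + pvS nums r c = pvSum nums r c :=
  pvFS_sum_aux nums (c - r) r c (by omega)

lemma pvFS_diff_aux (nums : List Int) : ∀ (k r c : Nat), c - r ≤ k →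
    pvF nums r c - pvS nums r c = pvD nums r c := by
  intro k
  induction k with
  | zero =>
    intro r c h
    rw [pvF_le nums (by omega), pvS_le nums (by omega), pvD_le nums (by omega)]
    ring
  | succ k ih =>
    intro r c h
    by_cases hrc : c ≤ r
    · rw [pvF_le nums hrc, pvS_le nums hrc, pvD_le nums hrc]; ring
    · rw [pvF_gt nums (show r < c by omega), pvS_gt nums (show r < c by omega),
        pvD_gt nums (show r < c by omega)]
      have d1 := ih (r + 1) c (by omega)
      have d2 := ih r (c - 1) (by omega)
      have s1 := pvFS_sum nums (r + 1) c
      have s2 := pvFS_sum nums r (c - 1)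
      have h3 : pvSum nums r c = nums.getD r 0 + pvSum nums (r + 1) c :=
        pvSum_gt nums (by omega)
      have h4 : pvSum nums r c = pvSum nums r (c - 1) + nums.getD c 0 :=
        pvSum_split_right nums (c - r) r c (by omega) (by omega)
      rcases max_cases (nums.getD r 0 + pvS nums (r + 1) c)
          (nums.getD c 0 + pvS nums r (c - 1)) with ⟨hm, _⟩ | ⟨hm, _⟩ <;>
        rcases min_cases (pvF nums (r + 1) c) (pvF nums r (c - 1)) with
          ⟨hm2, hle2⟩ | ⟨hm2, hle2⟩ <;>
        rcases max_cases (nums.getD r 0 - pvD nums (r + 1) c)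
          (nums.getD c 0 - pvD nums r (c - 1)) with ⟨hm3, hle3⟩ | ⟨hm3, hle3⟩ <;>
        omega

lemma pvFS_diff (nums : List Int) (r c : Nat) :
    pvF nums r c - pvS nums r c = pvD nums r c :=
  pvFS_diff_aux nums (c - r) r c (by omega)

lemma pvSum_eq_sum_drop (nums : List Int) : ∀ (k r : Nat), nums.length - 1 - r ≤ k →
    r < nums.length → pvSum nums r (nums.length - 1) = (nums.drop r).sum := by
  intro k
  induction k with
  | zero =>
    intro r h hr
    have hre : r = nums.length - 1 := by omega
    rw [pvSum_le nums (by omega)]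
    rw [List.drop_eq_getElem_cons (by omega : r < nums.length)]
    rw [show r + 1 = nums.length by omega, List.drop_length]
    simp [List.getD_eq_getElem?_getD, List.getElem?_eq_getElem (by omega : r < nums.length)]
  | succ k ih =>
    intro r h hr
    by_cases hlast : r = nums.length - 1
    · subst hlast
      rw [pvSum_le nums (by omega)]
      rw [List.drop_eq_getElem_cons (by omega : nums.length - 1 < nums.length)]
      rw [show nums.length - 1 + 1 = nums.length by omega, List.drop_length]
      simp [List.getD_eq_getElem?_getD,
        List.getElem?_eq_getElem (by omega : nums.length - 1 < nums.length)]
    · rw [pvSum_gt nums (by omega)]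
      rw [ih (r + 1) (by omega) (by omega)]
      conv_rhs => rw [List.drop_eq_getElem_cons (show r < nums.length by omega)]
      rw [List.sum_cons]
      simp [List.getD_eq_getElem?_getD, List.getElem?_eq_getElem (show r < nums.length by omega)]

lemma floordiv_final (f s : Int) : PySem.Int.floordiv (f + s + |f - s|) 2 = max f s := by
  have h2 : f + s + |f - s| = 2 * max f s := by
    rcases le_total f s with h | h
    · rw [abs_of_nonpos (by omega), max_eq_right h]; ring
    · rw [abs_of_nonneg (by omega), max_eq_left h]; ring
  rw [h2, PySem.Int.floordiv_eq_ediv_of_pos (by norm_num)]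
  exact Int.mul_ediv_cancel_left _ (by norm_num)

-- table well-formedness
def TblOK (n : Nat) (t : List (List Int)) : Prop :=
  t.length = n ∧ ∀ r, r < n → (t.getD r []).length = n

lemma getD_set_list {α : Type} [Inhabited α] (l : List α) (i : Nat) (v : α) (j : Nat) (d : α)
    (hi : i < l.length) :
    (l.set i v).getD j d = if j = i then v else l.getD j d := by
  rcases eq_or_ne j i with rfl | hne
  · simp [List.getD_eq_getElem?_getD, hi]
  · simp [List.getD_eq_getElem?_getD, List.getElem?_set_ne (Ne.symm hne), hne]

lemma tblOK_set2 {n : Nat} {t : List (List Int)} (h : TblOK n t) (r c : Nat) (v : Int) :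
    TblOK n (pvSet2 t r c v) := by
  obtain ⟨h1, h2⟩ := h
  refine ⟨by simp [pvSet2, h1], ?_⟩
  intro r' hr'
  by_cases hrn : r < n
  · rw [pvSet2, getD_set_list t r _ r' [] (by omega)]
    split_ifs with he
    · subst he; rw [List.length_set]; exact h2 r' hr'
    · exact h2 r' hr'
  · rw [pvSet2, List.set_eq_of_length_le (by omega)]
    exact h2 r' hr'

lemma get2_set2 {n : Nat} {t : List (List Int)} (h : TblOK n t) {r c : Nat}
    (hr : r < n) (_hc : c < n) (v : Int) (r' c' : Nat) :
    pvGet2 (pvSet2 t r c v) r' c' = if r' = r ∧ c' = c then v else pvGet2 t r' c' := by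
  obtain ⟨h1, h2⟩ := h
  rw [pvGet2, pvSet2, getD_set_list t r _ r' [] (by omega)]
  rcases eq_or_ne r' r with rfl | hner
  · rw [if_pos rfl]
    rw [getD_set_list _ c v c' 0 (by rw [h2 r' hr]; omega)]
    rcases eq_or_ne c' c with rfl | hnec
    · simp
    · simp [hnec, pvGet2]
  · simp [hner, pvGet2]

-- invariant for A's tables: all strict diagonals up to m are filled (diag 0 done by the init loop)
def InvA (nums : List Int) (n m : Nat) (st : List (List Int) × List (List Int)) : Prop :=
  TblOK n st.1 ∧ TblOK n st.2 ∧
  ∀ r c, r < n → c < n →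
    (pvGet2 st.1 r c = if r ≤ c ∧ c - r ≤ m then pvF nums r c else 0) ∧
    (pvGet2 st.2 r c = if r ≤ c ∧ c - r ≤ m then pvS nums r c else 0)

lemma init_aux (nums : List Int) (n : Nat) : ∀ (k : Nat), k ≤ n →
    (let st := (List.range k).foldl
      (fun st i => (pvSet2 st.1 i i (nums.getD i 0), pvSet2 st.2 i i 0))
      (List.replicate n (List.replicate n (0 : Int)),
       List.replicate n (List.replicate n (0 : Int)))
     TblOK n st.1 ∧ TblOK n st.2 ∧
      ∀ r c, r < n → c < n →
        (pvGet2 st.1 r c = if r = c ∧ r < k then nums.getD r 0 else 0) ∧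
        pvGet2 st.2 r c = 0) := by
  intro k
  induction k with
  | zero =>
    intro _
    have hT : TblOK n (List.replicate n (List.replicate n (0 : Int))) := by
      constructor
      · simp
      · intro r hr
        simp [List.getD_eq_getElem?_getD, hr]
    refine ⟨hT, hT, ?_⟩
    intro r c hr hc
    constructor
    · rw [if_neg (by omega)]
      simp [pvGet2, List.getD_eq_getElem?_getD, hr, hc]
    · simp [pvGet2, List.getD_eq_getElem?_getD, hr, hc]
  | succ k ih =>
    intro hk
    have ihh := ih (by omega)
    simp only [List.range_succ, List.foldl_append, List.foldl_cons, List.foldl_nil]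
    obtain ⟨hT1, hT2, hget⟩ := ihh
    refine ⟨tblOK_set2 hT1 _ _ _, tblOK_set2 hT2 _ _ _, ?_⟩
    intro r c hr hc
    rw [get2_set2 hT1 (by omega) (by omega), get2_set2 hT2 (by omega) (by omega)]
    obtain ⟨hg1, hg2⟩ := hget r c hr hc
    constructor
    · split_ifs with h1 h2 h2
      · rw [h1.1]
      · omega
      · rw [hg1, if_pos (by omega)]
      · rw [hg1, if_neg (by omega)]
    · split_ifs with h1
      · rfl
      · exact hg2

lemma invA_while (nums : List Int) (n i : Nat) (hi : 1 ≤ i) :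
    ∀ (fuel r : Nat) (st : List (List Int) × List (List Int)),
      n - (r + i) ≤ fuel →
      (TblOK n st.1 ∧ TblOK n st.2 ∧
        ∀ r' c', r' < n → c' < n →
          (pvGet2 st.1 r' c' =
            if (r' ≤ c' ∧ c' - r' < i) ∨ (c' - r' = i ∧ r' < r) then pvF nums r' c' else 0) ∧
          (pvGet2 st.2 r' c' =
            if (r' ≤ c' ∧ c' - r' < i) ∨ (c' - r' = i ∧ r' < r) then pvS nums r' c' else 0)) →
      InvA nums n i (deckAWhile nums n fuel r (r + i) st) := by
  intro fuel
  induction fuel with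
  | zero =>
    intro r st hfuel hst
    obtain ⟨hT1, hT2, hget⟩ := hst
    rw [deckAWhile]
    refine ⟨hT1, hT2, ?_⟩
    intro r' c' hr' hc'
    obtain ⟨hg1, hg2⟩ := hget r' c' hr' hc'
    have hcond : ((r' ≤ c' ∧ c' - r' < i) ∨ (c' - r' = i ∧ r' < r)) ↔ (r' ≤ c' ∧ c' - r' ≤ i) := by
      omega
    rw [hg1, hg2, if_congr hcond rfl rfl, if_congr hcond rfl rfl]
    exact ⟨rfl, rfl⟩
  | succ fuel ih =>
    intro r st hfuel hst
    obtain ⟨hT1, hT2, hget⟩ := hst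
    obtain ⟨f, s⟩ := st
    rw [deckAWhile]
    by_cases hc : r + i < n
    case neg =>
      rw [if_neg hc]
      refine ⟨hT1, hT2, ?_⟩
      intro r' c' hr' hc'
      obtain ⟨hg1, hg2⟩ := hget r' c' hr' hc'
      have hcond : ((r' ≤ c' ∧ c' - r' < i) ∨ (c' - r' = i ∧ r' < r)) ↔ (r' ≤ c' ∧ c' - r' ≤ i) := by
        omega
      rw [hg1, hg2, if_congr hcond rfl rfl, if_congr hcond rfl rfl]
      exact ⟨rfl, rfl⟩
    case pos =>
      rw [if_pos hc]
      simp only []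
      have hrs1 : pvGet2 s (r + 1) (r + i) = pvS nums (r + 1) (r + i) := by
        rw [(hget (r + 1) (r + i) (by omega) (by omega)).2, if_pos (by omega)]
      have hrs2 : pvGet2 s r (r + i - 1) = pvS nums r (r + i - 1) := by
        rw [(hget r (r + i - 1) (by omega) (by omega)).2, if_pos (by omega)]
      set fv := max (nums.getD r 0 + pvGet2 s (r + 1) (r + i))
        (nums.getD (r + i) 0 + pvGet2 s r (r + i - 1)) with hfv
      set f' := pvSet2 f r (r + i) fv with hf'
      set sv := min (pvGet2 f' (r + 1) (r + i)) (pvGet2 f' r (r + i - 1)) with hsv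
      set s' := pvSet2 s r (r + i) sv with hs'
      have hfval : fv = pvF nums r (r + i) := by
        rw [hfv, hrs1, hrs2, pvF_gt nums (show r < r + i by omega)]
      have hTf' : TblOK n f' := tblOK_set2 hT1 _ _ _
      have hrf1 : pvGet2 f' (r + 1) (r + i) = pvF nums (r + 1) (r + i) := by
        rw [hf', get2_set2 hT1 (by omega) (by omega), if_neg (by omega)]
        rw [(hget (r + 1) (r + i) (by omega) (by omega)).1, if_pos (by omega)]
      have hrf2 : pvGet2 f' r (r + i - 1) = pvF nums r (r + i - 1) := by
        rw [hf', get2_set2 hT1 (by omega) (by omega), if_neg (by omega)]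
        rw [(hget r (r + i - 1) (by omega) (by omega)).1, if_pos (by omega)]
      have hsval : sv = pvS nums r (r + i) := by
        rw [hsv, hrf1, hrf2, pvS_gt nums (show r < r + i by omega)]
      have hstep := ih (r + 1) (f', s') (by omega) ?_
      · have he : r + 1 + i = r + i + 1 := by omega
        rw [he] at hstep
        exact hstep
      · refine ⟨hTf', tblOK_set2 hT2 _ _ _, ?_⟩
        intro r' c' hr' hc'
        rw [hf', hs', get2_set2 hT1 (by omega) (by omega), get2_set2 hT2 (by omega) (by omega)]
        obtain ⟨hg1, hg2⟩ := hget r' c' hr' hc'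
        constructor
        · split_ifs with h1 h2 h2
          · obtain ⟨he1, he2⟩ := h1; subst he1; subst he2; rw [hfval]
          · omega
          · rw [hg1, if_pos (by omega)]
          · rw [hg1, if_neg (by omega)]
        · split_ifs with h1 h2 h2
          · obtain ⟨he1, he2⟩ := h1; subst he1; subst he2; rw [hsval]
          · omega
          · rw [hg2, if_pos (by omega)]
          · rw [hg2, if_neg (by omega)]

lemma invA_outer (nums : List Int) (n : Nat) (m : Nat)
    (st : List (List Int) × List (List Int)) (h : InvA nums n 0 st) :
    InvA nums n (if m = 0 then 0 else m)
      ((List.range' 1 m).foldl (fun st i => deckAWhile nums n n 0 i st) st) := by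
  induction m with
  | zero => simpa using h
  | succ m ih =>
    rw [List.range'_concat, List.foldl_append, List.foldl_cons, List.foldl_nil]
    have hprev := ih
    set stm := (List.range' 1 m).foldl (fun st i => deckAWhile nums n n 0 i st) st with hstm
    obtain ⟨hT1, hT2, hget⟩ := hprev
    have hw := invA_while nums n (1 + m) (by omega) n 0 (stm) (by omega) ?_
    · rw [if_neg (by omega)]
      have h0 : 0 + (1 + m) = 1 + m := by omega
      rw [h0] at hw
      have hmm : (1 + m) = (m + 1) := by omega
      rw [hmm] at hw
      have hg : 1 + 1 * m = m + 1 := by omega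
      rw [hg]
      exact hw
    · refine ⟨hT1, hT2, ?_⟩
      intro r' c' hr' hc'
      obtain ⟨hg1, hg2⟩ := hget r' c' hr' hc'
      have hcond : ((r' ≤ c' ∧ c' - r' ≤ if m = 0 then 0 else m)) ↔
          ((r' ≤ c' ∧ c' - r' < 1 + m) ∨ (c' - r' = 1 + m ∧ r' < 0)) := by
        split_ifs with hm
        · omega
        · omega
      rw [hg1, hg2, if_congr hcond rfl rfl, if_congr hcond rfl rfl]
      exact ⟨rfl, rfl⟩

-- B's dp characterization
lemma dpB_inner (nums : List Int) (n i : Nat) (hn : n = nums.length) (_hi : i + 1 ≤ n) :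
    ∀ (cnt j0 : Nat) (dp : List Int), dp.length = n → i + 1 ≤ j0 → j0 + cnt = n →
      (∀ j, j < n → dp.getD j 0 =
        if i + 1 ≤ j ∧ j < j0 then pvD nums i j
        else if i + 1 ≤ j then pvD nums (i + 1) j else pvD nums j j) →
      (let dp' := (List.range' j0 cnt).foldl
        (fun dp j =>
          dp.set j (max (nums.getD i 0 - dp.getD j 0) (nums.getD j 0 - dp.getD (j - 1) 0))) dp
       dp'.length = n ∧ ∀ j, j < n → dp'.getD j 0 =
          if i + 1 ≤ j then pvD nums i j else pvD nums j j) := by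
  intro cnt
  induction cnt with
  | zero =>
    intro j0 dp hlen hj0 hcnt hdp
    simp only [List.range'_zero, List.foldl_nil]
    refine ⟨hlen, ?_⟩
    intro j hj
    rw [hdp j hj]
    split_ifs with h1 h2 h2 <;> first | rfl | omega
  | succ cnt ih =>
    intro j0 dp hlen hj0 hcnt hdp
    rw [List.range'_succ, List.foldl_cons]
    have hj0n : j0 < n := by omega
    have hv : max (nums.getD i 0 - dp.getD j0 0) (nums.getD j0 0 - dp.getD (j0 - 1) 0) =
        pvD nums i j0 := by
      rw [hdp j0 hj0n, if_neg (by omega), if_pos (by omega)]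
      have hprev : dp.getD (j0 - 1) 0 = pvD nums i (j0 - 1) := by
        rw [hdp (j0 - 1) (by omega)]
        by_cases hedge : i + 1 ≤ j0 - 1
        · rw [if_pos (by omega)]
        · rw [if_neg (by omega), if_neg (by omega)]
          have : j0 - 1 = i := by omega
          rw [this]
      rw [hprev]
      conv_rhs => rw [pvD_gt nums (by omega : i < j0)]
    apply ih (j0 + 1) _ (by simpa using hlen) (by omega) (by omega)
    intro j hj
    rw [getD_set_list dp j0 _ j 0 (by omega)]
    split_ifs with he h1 h2 h3 h4
    · subst he; exact hv
    · omega
    · omega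
    · rw [hdp j hj, if_pos (by omega)]
    · rw [hdp j hj, if_neg (by omega), if_pos (by omega)]
    · rw [hdp j hj, if_neg (by omega), if_neg (by omega)]

lemma dpB_outer (nums : List Int) (n : Nat) (hn : n = nums.length) (hn1 : 1 ≤ n) :
    ∀ (l : Nat) (dp : List Int), l ≤ n - 1 → dp.length = n →
      (∀ j, j < n → dp.getD j 0 = if l ≤ j then pvD nums l j else pvD nums j j) →
      (let dp' := ((List.range l).reverse).foldl
        (fun dp i =>
          (List.range' (i + 1) (n - 1 - i)).foldl
            (fun dp j =>
              dp.set j (max (nums.getD i 0 - dp.getD j 0) (nums.getD j 0 - dp.getD (j - 1) 0)))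
            dp)
        dp
       dp'.length = n ∧ ∀ j, j < n → dp'.getD j 0 = pvD nums 0 j) := by
  intro l
  induction l with
  | zero =>
    intro dp _ hlen hdp
    simp only [List.range_zero, List.reverse_nil, List.foldl_nil]
    refine ⟨hlen, ?_⟩
    intro j hj
    rw [hdp j hj, if_pos (by omega)]
  | succ l ih =>
    intro dp hl hlen hdp
    rw [List.range_succ, List.reverse_append, List.reverse_singleton, List.singleton_append,
      List.foldl_cons]
    have hstep := dpB_inner nums n l hn (by omega) (n - 1 - l) (l + 1) dp hlen (by omega)
      (by omega) ?_
    · obtain ⟨hlen', hdp'⟩ := hstep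
      apply ih _ (by omega) hlen'
      intro j hj
      rw [hdp' j hj]
      split_ifs with h1 h2 h2
      · rfl
      · omega
      · have hjl : j = l := by omega
        subst hjl
        rfl
      · rfl
    · intro j hj
      rw [hdp j hj]
      split_ifs with h1 h2 h2 <;> first | rfl | omega

-- ===== VERDICT (by name: the statement is the Claim_ definition above) =====
theorem deck_game_dp_spec : Claim_equal_deck_game_dp := by
  intro nums _ hpre
  have hn1 : 1 ≤ nums.length := List.length_pos_of_ne_nil hpre
  show deck_game_dp nums = deck_game_dp_alt nums
  unfold deck_game_dp deck_game_dp_alt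
  simp only []
  -- A side: characterize the final tables
  have hinit := init_aux nums nums.length nums.length (le_refl _)
  simp only [] at hinit
  obtain ⟨hT1, hT2, hget0⟩ := hinit
  have hInv0 : InvA nums nums.length 0
      ((List.range nums.length).foldl
        (fun st i => (pvSet2 st.1 i i (nums.getD i 0), pvSet2 st.2 i i 0))
        (List.replicate nums.length (List.replicate nums.length (0 : Int)),
         List.replicate nums.length (List.replicate nums.length (0 : Int)))) := by
    refine ⟨hT1, hT2, ?_⟩
    intro r c hr hc
    obtain ⟨hg1, hg2⟩ := hget0 r c hr hc
    constructor
    · rw [hg1]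
      split_ifs with h1 h2 h2
      · obtain ⟨rfl, _⟩ := h1; rw [pvF_le nums (by omega : r ≤ r)]
      · omega
      · omega
      · rfl
    · rw [hg2]
      split_ifs with h1
      · have : r = c := by omega
        subst this
        rw [pvS_le nums (by omega : r ≤ r)]
      · rfl
  have hA := invA_outer nums nums.length (nums.length - 1) _ hInv0
  obtain ⟨_, _, hAget⟩ := hA
  obtain ⟨hAg1, hAg2⟩ := hAget 0 (nums.length - 1) (by omega) (by omega)
  rw [hAg1, hAg2, if_pos (by split_ifs with h <;> omega), if_pos (by split_ifs with h <;> omega)]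
  -- B side: characterize the final dp vector
  have hB := dpB_outer nums nums.length rfl hn1 (nums.length - 1) nums (by omega) rfl ?_
  · simp only [] at hB
    obtain ⟨hBlen, hBget⟩ := hB
    rw [hBget (nums.length - 1) (by omega)]
    -- arithmetic finish
    have hsum : nums.sum = pvSum nums 0 (nums.length - 1) := by
      rw [pvSum_eq_sum_drop nums (nums.length - 1) 0 (by omega) (by omega), List.drop_zero]
    rw [hsum, ← pvFS_sum nums 0 (nums.length - 1), ← pvFS_diff nums 0 (nums.length - 1)]
    exact (floordiv_final (pvF nums 0 (nums.length - 1)) (pvS nums 0 (nums.length - 1))).symm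
  · intro j hj
    split_ifs with h1
    · have : j = nums.length - 1 := by omega
      subst this
      rw [pvD_le nums (by omega : nums.length - 1 ≤ nums.length - 1)]
    · rw [pvD_le nums (by omega : j ≤ j)]
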